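-- pv_equiv track=rewrite | github.com/etonai/piano-practice-tracker-opus | app/docs/convert_historical_data.py | map_activity_code
-- ===== SOURCE A (Python) =====
-- from typing import Dict, List, Tuple
--
-- def map_activity_code(code: str) -> Tuple[str, int, str]:
--     """
--     Map activity codes to (activity_type, level, performance_type)
--     Returns: (PRACTICE/PERFORMANCE, level, performance_type)
--     """
--     # Remove any trailing characters like V, ?, etc.
--     clean_code = ''.join(c for c in code if c in 'pPaAXx')
--
--     if not clean_code:
--         return None
--
--     # Performance codes
--     if 'X' in clean_code:
--         return ("PERFORMANCE", 2, "practice")  # Satisfactory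
--     elif 'x' in clean_code:
--         return ("PERFORMANCE", 1, "practice")  # Unsatisfactory
--
--     # Practice codes (check for multiple, take highest level)
--     practice_levels = []
--     if 'P' in clean_code:
--         practice_levels.append(4)  # Perfect Complete
--     if 'A' in clean_code:
--         practice_levels.append(2)  # Complete with Review
--     if 'p' in clean_code or 'a' in clean_code:
--         practice_levels.append(1)  # Essentials
--
--     if practice_levels:
--         return ("PRACTICE", max(practice_levels), "practice")
--
--     return None
-- ===== SOURCE B (Python) =====
-- _RULES = [
--     ("X", ("PERFORMANCE", 2, "practice")),
--     ("x", ("PERFORMANCE", 1, "practice")),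
--     ("P", ("PRACTICE", 4, "practice")),
--     ("A", ("PRACTICE", 2, "practice")),
--     ("pa", ("PRACTICE", 1, "practice")),
-- ]
--
-- def map_activity_code(code):
--     for chars, result in _RULES:
--         if any(c in code for c in chars):
--             return result
--     return None
-- ===== Notes on version B (the rewrite author's own statement) =====
-- stated objective: simpler
-- what changed: Replaced the filter-then-branch-and-max logic with a single priority-ordered rule table scanned once for the first character group present in the input; the cleaning pass and the practice_levels list with max() disappear.
import Mathlib
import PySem

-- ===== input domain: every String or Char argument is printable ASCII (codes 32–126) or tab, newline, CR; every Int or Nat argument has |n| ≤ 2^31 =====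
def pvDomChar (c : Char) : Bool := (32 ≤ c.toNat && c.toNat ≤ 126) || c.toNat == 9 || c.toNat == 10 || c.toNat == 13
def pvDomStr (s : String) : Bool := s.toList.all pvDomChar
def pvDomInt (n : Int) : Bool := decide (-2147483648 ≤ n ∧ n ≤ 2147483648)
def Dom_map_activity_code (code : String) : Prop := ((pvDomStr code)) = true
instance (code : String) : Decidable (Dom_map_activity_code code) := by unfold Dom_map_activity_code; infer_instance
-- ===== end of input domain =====

-- B replaces A's filter-then-branch-and-max logic with a single priority-ordered rule
-- table scanned for the first character group present in the input (objective: simpler).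


-- ===== PORT A =====
def map_activity_code (code : String) : Option (String × Int × String) :=
  -- clean_code = ''.join(c for c in code if c in 'pPaAXx')
  let clean_code : List Char := code.toList.filter (fun c => "pPaAXx".toList.contains c)
  if clean_code = [] then none
  else if clean_code.contains 'X' then some ("PERFORMANCE", 2, "practice")
  else if clean_code.contains 'x' then some ("PERFORMANCE", 1, "practice")
  else
    -- practice_levels built by the three sequential appends
    let practice_levels : List Int :=
      (if clean_code.contains 'P' then [(4 : Int)] else []) ++
      (if clean_code.contains 'A' then [(2 : Int)] else []) ++
      (if clean_code.contains 'p' ∨ clean_code.contains 'a' then [(1 : Int)] else [])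
    -- 'if practice_levels: return ("PRACTICE", max(practice_levels), "practice"); return None'
    match PySem.List.max? practice_levels (fun x => x) with
    | some m => some ("PRACTICE", m, "practice")
    | none => none

-- ===== PORT B =====
def pvRules : List (List Char × (String × Int × String)) :=
  [(['X'], ("PERFORMANCE", 2, "practice")),
   (['x'], ("PERFORMANCE", 1, "practice")),
   (['P'], ("PRACTICE", 4, "practice")),
   (['A'], ("PRACTICE", 2, "practice")),
   (['p', 'a'], ("PRACTICE", 1, "practice"))]

def map_activity_code_alt (code : String) : Option (String × Int × String) :=
  (pvRules.find? (fun r => r.1.any (fun c => code.toList.contains c))).map Prod.snd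

-- ===== PRECONDITION & SPEC =====
def Spec_map_activity_code (code : String) (out : Option (String × Int × String)) : Prop := out = map_activity_code_alt code
instance (code : String) (out : Option (String × Int × String)) : Decidable (Spec_map_activity_code code out) := by unfold Spec_map_activity_code; infer_instance

-- ===== CLAIM (what is proved, stated in full; the proofs are below) =====
def Claim_equal_map_activity_code : Prop := ∀ (code : String), Dom_map_activity_code code → Spec_map_activity_code code (map_activity_code code)

-- ===== LEMMAS AND PROOFS =====

-- filtering to the key characters does not change membership of a key character
theorem pv_contains_filter (l : List Char) (c : Char)
    (h : ("pPaAXx".toList.contains c) = true) :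
    (l.filter (fun c => "pPaAXx".toList.contains c)).contains c = l.contains c := by
  simp only [List.contains_eq_mem, List.mem_filter, decide_eq_decide]
  exact ⟨fun ⟨h1, _⟩ => h1, fun h1 => ⟨h1, by simpa using h⟩⟩

-- clean_code is empty iff none of the six key characters occurs in the input
theorem pv_filter_nil (l : List Char) :
    (l.filter (fun c => "pPaAXx".toList.contains c) = []) ↔
      (l.contains 'X' || l.contains 'x' || l.contains 'P' || l.contains 'A' ||
       l.contains 'p' || l.contains 'a') = false := by
  simp only [List.filter_eq_nil_iff, Bool.or_eq_false_iff, List.contains_eq_mem,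
    decide_eq_false_iff_not]
  constructor
  · intro h
    refine ⟨⟨⟨⟨⟨fun hm => ?_, fun hm => ?_⟩, fun hm => ?_⟩, fun hm => ?_⟩, fun hm => ?_⟩, fun hm => ?_⟩ <;>
      exact absurd (by decide) (h _ hm)
  · rintro ⟨⟨⟨⟨⟨h1, h2⟩, h3⟩, h4⟩, h5⟩, h6⟩ c hc hkey
    have : c = 'p' ∨ c = 'P' ∨ c = 'a' ∨ c = 'A' ∨ c = 'X' ∨ c = 'x' := by
      have : c ∈ "pPaAXx".toList := by simpa using hkey
      simp only [show "pPaAXx".toList = ['p','P','a','A','X','x'] from rfl, List.mem_cons,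
        List.not_mem_nil, or_false] at this
      exact this
    rcases this with rfl | rfl | rfl | rfl | rfl | rfl <;> tauto

-- both sides are functions of the six membership booleans; check all 64 combinations
theorem map_activity_code_eq_alt (code : String) :
    map_activity_code code = map_activity_code_alt code := by
  simp only [map_activity_code, map_activity_code_alt, pvRules, List.find?,
    List.any_cons, List.any_nil, Bool.or_false,
    pv_contains_filter _ 'X' (by decide), pv_contains_filter _ 'x' (by decide),
    pv_contains_filter _ 'P' (by decide), pv_contains_filter _ 'A' (by decide),
    pv_contains_filter _ 'p' (by decide), pv_contains_filter _ 'a' (by decide),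
    pv_filter_nil]
  generalize code.toList.contains 'X' = bX
  generalize code.toList.contains 'x' = bx
  generalize code.toList.contains 'P' = bP
  generalize code.toList.contains 'A' = bA
  generalize code.toList.contains 'p' = bp
  generalize code.toList.contains 'a' = ba
  cases bX <;> cases bx <;> cases bP <;> cases bA <;> cases bp <;> cases ba <;> rfl

-- ===== VERDICT (by name: the statement is the Claim_ definition above) =====
theorem map_activity_code_spec : Claim_equal_map_activity_code := by
  intro code _
  exact map_activity_code_eq_alt code
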